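-- pv_equiv track=rewrite | github.com/mlynnf123/GFMD | enhanced_contact_discovery.py | prioritize_by_title
-- ===== SOURCE A (Python) =====
-- from typing import Dict, Any, List, Optional
--
-- def prioritize_by_title(contacts: List[Dict[str, Any]]) -> List[Dict[str, Any]]:
--     """Prioritize contacts by title relevance"""
--
--     # High-priority titles for laboratory equipment sales
--     high_priority_titles = [
--         'laboratory director', 'lab director', 'director of laboratory',
--         'laboratory manager', 'lab manager', 'clinical laboratory director',
--         'pathology director', 'laboratory services director'
--     ]
--
--     medium_priority_titles = [
--         'equipment manager', 'facilities manager', 'operations manager',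
--         'vp operations', 'director operations', 'clinical director'
--     ]
--
--     def get_title_priority(contact):
--         title = contact.get('contact_title', '').lower()
--
--         for high_title in high_priority_titles:
--             if high_title in title:
--                 return 3  # High priority
--
--         for med_title in medium_priority_titles:
--             if med_title in title:
--                 return 2  # Medium priority
--
--         return 1  # Low priority
--
--     return sorted(contacts, key=get_title_priority, reverse=True)
-- ===== SOURCE B (Python) =====
-- from typing import Dict, Any, List
--
-- def prioritize_by_title(contacts: List[Dict[str, Any]]) -> List[Dict[str, Any]]:
--     """Bucket contacts into three priority buckets in one pass (stable), then concatenate."""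
--     high_keywords = (
--         'laboratory director', 'lab director', 'director of laboratory',
--         'laboratory manager', 'lab manager', 'clinical laboratory director',
--         'pathology director', 'laboratory services director'
--     )
--     medium_keywords = (
--         'equipment manager', 'facilities manager', 'operations manager',
--         'vp operations', 'director operations', 'clinical director'
--     )
--     high, medium, low = [], [], []
--     for contact in contacts:
--         title = contact.get('contact_title', '').lower()
--         bucket = low
--         for k in high_keywords:
--             if k in title:
--                 bucket = high
--                 break
--         else:
--             for k in medium_keywords:
--                 if k in title:
--                     bucket = medium
--                     break
--         bucket.append(contact)
--     return high + medium + low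
-- ===== Notes on version B (the rewrite author's own statement) =====
-- stated objective: alternative
-- what changed: Replaces sorted(contacts, key=priority, reverse=True) with a single stable pass that appends each contact to one of three priority buckets and concatenates high+medium+low.
import Mathlib
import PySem

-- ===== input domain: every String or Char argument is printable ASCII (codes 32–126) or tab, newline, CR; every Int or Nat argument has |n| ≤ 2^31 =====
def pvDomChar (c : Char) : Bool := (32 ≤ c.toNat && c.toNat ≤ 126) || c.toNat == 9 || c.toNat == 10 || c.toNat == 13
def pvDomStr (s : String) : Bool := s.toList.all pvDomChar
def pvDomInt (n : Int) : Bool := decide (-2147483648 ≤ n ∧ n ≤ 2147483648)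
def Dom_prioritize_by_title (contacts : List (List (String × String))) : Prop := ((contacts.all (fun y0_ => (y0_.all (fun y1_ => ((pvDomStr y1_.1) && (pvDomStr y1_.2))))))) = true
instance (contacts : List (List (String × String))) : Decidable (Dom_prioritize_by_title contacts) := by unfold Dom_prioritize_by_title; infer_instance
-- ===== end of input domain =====

-- B buckets contacts into the three priority classes in one stable pass and concatenates,
-- instead of A's sorted(..., key=..., reverse=True); alternative algorithm, same values.


-- ===== PORT A =====
def pvHighTitles : List String :=
  ["laboratory director", "lab director", "director of laboratory",
   "laboratory manager", "lab manager", "clinical laboratory director",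
   "pathology director", "laboratory services director"]

def pvMediumTitles : List String :=
  ["equipment manager", "facilities manager", "operations manager",
   "vp operations", "director operations", "clinical director"]

-- A's 'for t in titles: if t in title: return <hit>' loop (early return at first match)
def pvLoopIn (titles : List String) (title : String) : Bool :=
  match titles with
  | [] => false
  | t :: rest => if PySem.Str.isIn t title then true else pvLoopIn rest title

def pvGetTitlePriority (contact : List (String × String)) : Int :=
  let title := PySem.Str.lower (PySem.Dict.getD ⟨contact⟩ "contact_title" "")
  if pvLoopIn pvHighTitles title then 3
  else if pvLoopIn pvMediumTitles title then 2
  else 1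

def prioritize_by_title (contacts : List (List (String × String))) : List (List (String × String)) :=
  PySem.List.sorted contacts pvGetTitlePriority true

-- ===== PORT B =====
def pvHighKeywords : List String :=
  ["laboratory director", "lab director", "director of laboratory",
   "laboratory manager", "lab manager", "clinical laboratory director",
   "pathology director", "laboratory services director"]

def pvMediumKeywords : List String :=
  ["equipment manager", "facilities manager", "operations manager",
   "vp operations", "director operations", "clinical director"]

-- B's 'for k in keywords: if k in title: … break' scan
def pvScanIn (keywords : List String) (title : String) : Bool :=
  match keywords with
  | [] => false
  | k :: rest => if PySem.Str.isIn k title then true else pvScanIn rest title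

-- the loop body: append the contact to its bucket
def pvBucketStep (acc : List (List (String × String)) × List (List (String × String)) × List (List (String × String)))
    (contact : List (String × String)) :
    List (List (String × String)) × List (List (String × String)) × List (List (String × String)) :=
  let title := PySem.Str.lower (PySem.Dict.getD ⟨contact⟩ "contact_title" "")
  if pvScanIn pvHighKeywords title then (acc.1 ++ [contact], acc.2.1, acc.2.2)
  else if pvScanIn pvMediumKeywords title then (acc.1, acc.2.1 ++ [contact], acc.2.2)
  else (acc.1, acc.2.1, acc.2.2 ++ [contact])

def prioritize_by_title_alt (contacts : List (List (String × String))) : List (List (String × String)) :=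
  let buckets := contacts.foldl pvBucketStep ([], [], [])
  buckets.1 ++ buckets.2.1 ++ buckets.2.2

-- ===== PRECONDITION & SPEC =====
def Spec_prioritize_by_title (contacts : List (List (String × String))) (out : List (List (String × String))) : Prop := out = prioritize_by_title_alt contacts
instance (contacts : List (List (String × String))) (out : List (List (String × String))) : Decidable (Spec_prioritize_by_title contacts out) := by unfold Spec_prioritize_by_title; infer_instance

-- ===== CLAIM (what is proved, stated in full; the proofs are below) =====
def Claim_equal_prioritize_by_title : Prop := ∀ (contacts : List (List (String × String))), Dom_prioritize_by_title contacts → Spec_prioritize_by_title contacts (prioritize_by_title contacts)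

-- ===== LEMMAS AND PROOFS =====

-- key values are only 1, 2 or 3
theorem pvKey_cases (c : List (String × String)) :
    pvGetTitlePriority c = 3 ∨ pvGetTitlePriority c = 2 ∨ pvGetTitlePriority c = 1 := by
  unfold pvGetTitlePriority
  dsimp only
  split_ifs <;> simp

-- inserting skips an all-not-before prefix
theorem pvInsertBy_append {α : Type} (before : α → α → Bool) (x : α) (ys zs : List α)
    (h : ∀ y ∈ ys, before x y = false) :
    PySem.List.insertBy before x (ys ++ zs) = ys ++ PySem.List.insertBy before x zs := by
  induction ys with
  | nil => simp
  | cons y ys ih =>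
    have hy : before x y = false := h y (by simp)
    simp [PySem.List.insertBy, hy, ih (fun y hy => h y (by simp [hy]))]

-- inserting before a list whose head (if any) is 'before' x
theorem pvInsertBy_cons {α : Type} (before : α → α → Bool) (x : α) (zs : List α)
    (h : ∀ z ∈ zs, before x z = true) :
    PySem.List.insertBy before x zs = x :: zs := by
  cases zs with
  | nil => rfl
  | cons z zs => simp [PySem.List.insertBy, h z (by simp)]

-- the insertion-sort fold over a 3-valued key keeps the three key-blocks, each in input order
theorem pvFold_blocks (key : List (String × String) → Int)
    (hk : ∀ c, key c = 3 ∨ key c = 2 ∨ key c = 1)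
    (xs a3 a2 a1 : List (List (String × String)))
    (h3 : ∀ y ∈ a3, key y = 3) (h2 : ∀ y ∈ a2, key y = 2) (h1 : ∀ y ∈ a1, key y = 1) :
    xs.foldl (fun acc x => PySem.List.insertBy (fun a b => decide (key b < key a)) x acc) (a3 ++ a2 ++ a1)
      = (a3 ++ xs.filter (fun x => key x == 3)) ++ (a2 ++ xs.filter (fun x => key x == 2))
          ++ (a1 ++ xs.filter (fun x => key x == 1)) := by
  induction xs generalizing a3 a2 a1 with
  | nil => simp
  | cons x xs ih =>
    rcases hk x with hx | hx | hx
    · have hstep : PySem.List.insertBy (fun a b => decide (key b < key a)) x (a3 ++ a2 ++ a1)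
          = (a3 ++ [x]) ++ a2 ++ a1 := by
        rw [List.append_assoc,
          pvInsertBy_append _ x a3 (a2 ++ a1) (by intro y hy; simp [h3 y hy, hx]),
          pvInsertBy_cons _ x (a2 ++ a1) (by
            intro z hz; rcases List.mem_append.1 hz with hz | hz
            · simp [h2 z hz, hx]
            · simp [h1 z hz, hx])]
        simp
      simp only [List.foldl_cons, hstep]
      rw [ih (a3 ++ [x]) a2 a1
            (by intro y hy; rcases List.mem_append.1 hy with hy | hy
                · exact h3 y hy
                · simp at hy; simpa [hy] using hx)
            h2 h1]
      simp [List.filter_cons, hx]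
    · have hstep : PySem.List.insertBy (fun a b => decide (key b < key a)) x (a3 ++ a2 ++ a1)
          = a3 ++ (a2 ++ [x]) ++ a1 := by
        rw [List.append_assoc,
          pvInsertBy_append _ x a3 (a2 ++ a1) (by intro y hy; simp [h3 y hy, hx]),
          pvInsertBy_append _ x a2 a1 (by intro y hy; simp [h2 y hy, hx]),
          pvInsertBy_cons _ x a1 (by intro z hz; simp [h1 z hz, hx])]
        simp
      simp only [List.foldl_cons, hstep]
      rw [ih a3 (a2 ++ [x]) a1 h3
            (by intro y hy; rcases List.mem_append.1 hy with hy | hy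
                · exact h2 y hy
                · simp at hy; simpa [hy] using hx)
            h1]
      simp [List.filter_cons, hx]
    · have hstep : PySem.List.insertBy (fun a b => decide (key b < key a)) x (a3 ++ a2 ++ a1)
          = a3 ++ a2 ++ (a1 ++ [x]) := by
        rw [List.append_assoc,
          pvInsertBy_append _ x a3 (a2 ++ a1) (by intro y hy; simp [h3 y hy, hx]),
          pvInsertBy_append _ x a2 a1 (by intro y hy; simp [h2 y hy, hx]),
          PySem.List.insertBy_of_forall_not_before _ x a1 (by intro y hy; simp [h1 y hy, hx])]
        simp
      simp only [List.foldl_cons, hstep]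
      rw [ih a3 a2 (a1 ++ [x]) h3 h2
            (by intro y hy; rcases List.mem_append.1 hy with hy | hy
                · exact h1 y hy
                · simp at hy; simpa [hy] using hx)]
      simp [List.filter_cons, hx]

-- A's sort is the three filters concatenated
theorem pvA_filters (contacts : List (List (String × String))) :
    prioritize_by_title contacts
      = contacts.filter (fun x => pvGetTitlePriority x == 3)
        ++ contacts.filter (fun x => pvGetTitlePriority x == 2)
        ++ contacts.filter (fun x => pvGetTitlePriority x == 1) := by
  unfold prioritize_by_title
  rw [PySem.List.sorted_rev_eq_foldl_insertBy]
  simpa using pvFold_blocks pvGetTitlePriority pvKey_cases contacts [] [] []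
    (by simp) (by simp) (by simp)

-- B's fold accumulates exactly the three filters
theorem pvB_fold (xs h m l : List (List (String × String))) :
    xs.foldl pvBucketStep (h, m, l)
      = (h ++ xs.filter (fun x => pvGetTitlePriority x == 3),
         m ++ xs.filter (fun x => pvGetTitlePriority x == 2),
         l ++ xs.filter (fun x => pvGetTitlePriority x == 1)) := by
  induction xs generalizing h m l with
  | nil => simp
  | cons x xs ih =>
    have hscanH : pvScanIn pvHighKeywords = pvLoopIn pvHighTitles := rfl
    have hscanM : pvScanIn pvMediumKeywords = pvLoopIn pvMediumTitles := rfl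
    simp only [List.foldl_cons, List.filter_cons]
    by_cases hH : pvLoopIn pvHighTitles (PySem.Str.lower (PySem.Dict.getD ⟨x⟩ "contact_title" "")) = true
    · have hkey : pvGetTitlePriority x = 3 := by simp [pvGetTitlePriority, hH]
      have hstep : pvBucketStep (h, m, l) x = (h ++ [x], m, l) := by
        simp [pvBucketStep, hscanH, hH]
      rw [hstep, ih]
      simp [hkey]
    · by_cases hM : pvLoopIn pvMediumTitles (PySem.Str.lower (PySem.Dict.getD ⟨x⟩ "contact_title" "")) = true
      · have hkey : pvGetTitlePriority x = 2 := by simp [pvGetTitlePriority, hH, hM]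
        have hstep : pvBucketStep (h, m, l) x = (h, m ++ [x], l) := by
          simp [pvBucketStep, hscanH, hscanM, hH, hM]
        rw [hstep, ih]
        simp [hkey]
      · have hkey : pvGetTitlePriority x = 1 := by simp [pvGetTitlePriority, hH, hM]
        have hstep : pvBucketStep (h, m, l) x = (h, m, l ++ [x]) := by
          simp [pvBucketStep, hscanH, hscanM, hH, hM]
        rw [hstep, ih]
        simp [hkey]

-- ===== VERDICT (by name: the statement is the Claim_ definition above) =====
theorem prioritize_by_title_spec : Claim_equal_prioritize_by_title := by
  intro contacts _
  unfold Spec_prioritize_by_title prioritize_by_title_alt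
  rw [pvA_filters contacts, pvB_fold contacts [] [] []]
  simp
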